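-- pv_equiv track=rewrite | github.com/Judival30/Estructuras_de_datos | tareas/tarea1.py | sumarValoresMatriz
-- ===== SOURCE A (Python) =====
-- def sumarValoresMatriz(mat, par):
--     """
--     La función muestra la suma de los valores en las cordenadas ingresadas de la matiz dispersa
--     Args:
--         mat ([dict]): diccionario que contiene la información de una matriz dispersa
--         par ([list]): lista con tuplas que contienen las coordenadas
--     Returns:
--         [int]: Suma de los valores de la matriz
--     """
--     suma = 0
--     # Obtener los keys del dic
--     for i in mat:
--         # Obtener los valores (listas)
--         for j in range(len(mat[i])):
--             # Generar una tupla con la cual se va a comparar con la lista par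
--             var = (i, mat[i][j][0])
--             for puntos in par:
--                 # Verificar si la tupla está en la lista que se ingreso
--                 if var == puntos:
--                     # Si está entonces sumar el valor de la matriz
--                     suma += mat[i][j][1]
--     return suma
-- ===== SOURCE B (Python) =====
-- def sumarValoresMatriz(mat, par):
--     # Invert the traversal: flatten the sparse matrix once into a coordinate -> value
--     # dict (summing values on a repeated coordinate within a row, as A would count
--     # each occurrence), then iterate over the query list and add the looked-up value.
--     val = {}
--     for i, fila in mat.items():
--         for c, v in fila:
--             val[(i, c)] = val.get((i, c), 0) + v
--     suma = 0
--     for p in par: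
--         suma += val.get(p, 0)
--     return suma
-- ===== Notes on version B (the rewrite author's own statement) =====
-- stated objective: faster
-- what changed: B inverts the traversal: it flattens the matrix once into a coordinate->value dict and then iterates over the query list `par` adding one lookup per point, instead of A's triple loop that rescans the whole `par` list for every matrix entry.
import Mathlib
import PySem

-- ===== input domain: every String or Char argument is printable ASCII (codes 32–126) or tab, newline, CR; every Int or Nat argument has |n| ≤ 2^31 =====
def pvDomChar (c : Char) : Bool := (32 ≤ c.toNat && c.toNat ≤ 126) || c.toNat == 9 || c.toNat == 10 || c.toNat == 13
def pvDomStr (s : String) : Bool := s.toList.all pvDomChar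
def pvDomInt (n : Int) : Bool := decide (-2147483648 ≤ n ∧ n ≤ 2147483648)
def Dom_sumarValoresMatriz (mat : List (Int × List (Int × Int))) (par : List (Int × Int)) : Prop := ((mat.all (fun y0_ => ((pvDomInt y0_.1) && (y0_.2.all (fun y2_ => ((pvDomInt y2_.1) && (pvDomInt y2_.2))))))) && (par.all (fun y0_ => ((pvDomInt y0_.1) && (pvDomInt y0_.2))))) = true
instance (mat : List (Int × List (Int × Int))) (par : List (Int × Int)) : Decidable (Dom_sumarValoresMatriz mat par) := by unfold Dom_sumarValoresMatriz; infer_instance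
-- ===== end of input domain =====

-- B inverts the traversal: it flattens the matrix once into a coordinate->value dict,
-- then iterates over `par` adding one lookup per point (objective: faster).

-- ===== PORT A =====
-- for i in mat: for j in range(len(mat[i])): for puntos in par: if (i, mat[i][j][0]) == puntos: suma += mat[i][j][1]
def sumarValoresMatriz (mat : List (Int × List (Int × Int))) (par : List (Int × Int)) : Int :=
  let d := PySem.Dict.ofList mat
  d.keys.foldl (fun suma i =>
    (PySem.List.pyRange 0 ((d.getD i []).length : Int) 1).foldl (fun s j =>
      par.foldl (fun s2 puntos =>
        if (i, (PySem.List.pyGetD (d.getD i []) j ((0 : Int), (0 : Int))).1) == puntos then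
          s2 + (PySem.List.pyGetD (d.getD i []) j ((0 : Int), (0 : Int))).2
        else s2) s) suma) 0

-- ===== PORT B =====
-- val = {}; for i, fila in mat.items(): for c, v in fila: val[(i,c)] = val.get((i,c),0)+v
-- suma = 0; for p in par: suma += val.get(p, 0)
def sumarValoresMatriz_alt (mat : List (Int × List (Int × Int))) (par : List (Int × Int)) : Int :=
  let d := PySem.Dict.ofList mat
  let val := d.items.foldl (fun acc kv =>
    kv.2.foldl (fun a cv => a.insert (kv.1, cv.1) (a.getD (kv.1, cv.1) 0 + cv.2)) acc)
    (PySem.Dict.empty : PySem.Dict (Int × Int) Int)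
  par.foldl (fun suma p => suma + val.getD p 0) 0

-- ===== PRECONDITION & SPEC =====
def Spec_sumarValoresMatriz (mat : List (Int × List (Int × Int))) (par : List (Int × Int)) (out : Int) : Prop := out = sumarValoresMatriz_alt mat par
instance (mat : List (Int × List (Int × Int))) (par : List (Int × Int)) (out : Int) : Decidable (Spec_sumarValoresMatriz mat par out) := by unfold Spec_sumarValoresMatriz; infer_instance

-- ===== CLAIM (what is proved, stated in full; the proofs are below) =====
def Claim_equal_sumarValoresMatriz : Prop := ∀ (mat : List (Int × List (Int × Int))) (par : List (Int × Int)), Dom_sumarValoresMatriz mat par → Spec_sumarValoresMatriz mat par (sumarValoresMatriz mat par)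

-- ===== LEMMAS AND PROOFS =====

-- A's inner scan of `par` adds v once per matching coordinate: it is v * count.
theorem par_scan_eq_count (par : List (Int × Int)) (x : Int × Int) (v s : Int) :
    par.foldl (fun s2 p => if x == p then s2 + v else s2) s = s + v * (par.count x : Int) := by
  induction par generalizing s with
  | nil => simp [List.count]
  | cons p ps ih =>
    by_cases h : x = p
    · subst h
      rw [List.foldl_cons, if_pos (by simp), ih, List.count_cons_self]
      push_cast; ring
    · rw [List.foldl_cons, if_neg (by simp [h]), ih]; simp [List.count_cons]; left; exact Ne.symm h

-- Folding over the keys of an assoc list with nodup keys, looking each row up,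
-- is the same as folding over its items.
theorem keys_fold_eq_items_fold (L : List (Int × List (Int × Int)))
    (hnd : (L.map Prod.fst).Nodup)
    (g : Int → Int → List (Int × Int) → Int) (init : Int) :
    (L.map Prod.fst).foldl (fun s k => g s k ((PySem.Dict.mk L).getD k [])) init
      = L.foldl (fun s kv => g s kv.1 kv.2) init := by
  induction L generalizing init with
  | nil => rfl
  | cons kv rest ih =>
    obtain ⟨k, row⟩ := kv
    simp only [List.map_cons, List.nodup_cons] at hnd
    obtain ⟨hk, hnd'⟩ := hnd
    simp only [List.map_cons, List.foldl_cons]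
    have hhead : (PySem.Dict.mk ((k, row) :: rest)).getD k [] = row := by
      simp [PySem.Dict.getD, PySem.Dict.get?_mk_cons]
    rw [hhead]
    have hcong : (rest.map Prod.fst).foldl
        (fun s k' => g s k' ((PySem.Dict.mk ((k, row) :: rest)).getD k' []))
        (g init k row)
        = (rest.map Prod.fst).foldl
        (fun s k' => g s k' ((PySem.Dict.mk rest).getD k' [])) (g init k row) := by
      apply PySem.List.foldl_congr_mem
      intro acc x hx
      have hne : (k == x) = false := by
        have : k ≠ x := by
          intro he; exact hk (he ▸ hx)
        simp [this]
      simp [PySem.Dict.getD, PySem.Dict.get?_mk_cons, hne]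
    rw [hcong, ih hnd']

-- Summing the lookups of `par` in a dict after one accumulating insert at k:
-- the total grows by v * count par k.
theorem sum_lookup_insert (par : List (Int × Int)) (D : PySem.Dict (Int × Int) Int)
    (k : Int × Int) (v : Int) :
    (par.map (fun p => (D.insert k (D.getD k 0 + v)).getD p 0)).sum
      = (par.map (fun p => D.getD p 0)).sum + v * (par.count k : Int) := by
  induction par with
  | nil => simp
  | cons p ps ih =>
    rw [List.map_cons, List.sum_cons, ih, List.map_cons, List.sum_cons,
      PySem.Dict.getD_insert, List.count_cons]
    by_cases h : p = k
    · subst h; simp; ring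
    · have hne : ((p : Int × Int) == k) = false := by simp [h]
      rw [if_neg h, hne]
      push_cast; ring

-- One row of B's dict-building loop, seen through the final `par` lookups,
-- equals A's count-weighted sum over that row.
theorem row_build (row : List (Int × Int)) (i : Int) (par : List (Int × Int))
    (D : PySem.Dict (Int × Int) Int) :
    (par.map (fun p => (row.foldl (fun a cv => a.insert (i, cv.1) (a.getD (i, cv.1) 0 + cv.2)) D).getD p 0)).sum
      = row.foldl (fun s cv => s + cv.2 * (par.count (i, cv.1) : Int))
          ((par.map (fun p => D.getD p 0)).sum) := by
  induction row generalizing D with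
  | nil => rfl
  | cons cv rest ih =>
    rw [List.foldl_cons, List.foldl_cons, ih, sum_lookup_insert]

-- B's whole build-then-lookup computation equals A's nested count-weighted sum.
theorem items_build (items : List (Int × List (Int × Int))) (par : List (Int × Int))
    (D : PySem.Dict (Int × Int) Int) :
    (par.map (fun p => (items.foldl (fun acc kv =>
        kv.2.foldl (fun a cv => a.insert (kv.1, cv.1) (a.getD (kv.1, cv.1) 0 + cv.2)) acc) D).getD p 0)).sum
      = items.foldl (fun s kv => kv.2.foldl (fun s cv => s + cv.2 * (par.count (kv.1, cv.1) : Int)) s)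
          ((par.map (fun p => D.getD p 0)).sum) := by
  induction items generalizing D with
  | nil => rfl
  | cons kv rest ih =>
    rw [List.foldl_cons, List.foldl_cons, ih, row_build]

-- ===== VERDICT (by name: the statement is the Claim_ definition above) =====
theorem sumarValoresMatriz_spec : Claim_equal_sumarValoresMatriz := by
  intro mat par _
  unfold Spec_sumarValoresMatriz sumarValoresMatriz sumarValoresMatriz_alt
  simp only []
  set d := PySem.Dict.ofList mat with hd
  -- reduce A's pyRange index loop to a fold over the row, and its par-scan to a count
  have hA : ∀ (suma : Int) (i : Int) (row : List (Int × Int)),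
      (PySem.List.pyRange 0 (row.length : Int) 1).foldl (fun s j =>
        par.foldl (fun s2 puntos =>
          if (i, (PySem.List.pyGetD row j ((0:Int),(0:Int))).1) == puntos then
            s2 + (PySem.List.pyGetD row j ((0:Int),(0:Int))).2
          else s2) s) suma
      = row.foldl (fun s cv => s + cv.2 * (par.count (i, cv.1) : Int)) suma := by
    intro suma i row
    rw [PySem.List.foldl_pyRange_zero_pyGetD' row ((0:Int),(0:Int))
      (fun s e => par.foldl (fun s2 puntos => if (i, e.1) == puntos then s2 + e.2 else s2) s) suma]
    apply PySem.List.foldl_congr_mem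
    intro acc cv _
    rw [par_scan_eq_count]
  have hfold :
      d.keys.foldl (fun suma i =>
        (PySem.List.pyRange 0 ((d.getD i []).length : Int) 1).foldl (fun s j =>
          par.foldl (fun s2 puntos =>
            if (i, (PySem.List.pyGetD (d.getD i []) j ((0:Int),(0:Int))).1) == puntos then
              s2 + (PySem.List.pyGetD (d.getD i []) j ((0:Int),(0:Int))).2
            else s2) s) suma) 0
      = d.keys.foldl (fun suma i =>
          (d.getD i []).foldl (fun s cv => s + cv.2 * (par.count (i, cv.1) : Int)) suma) 0 := by
    apply PySem.List.foldl_congr_mem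
    intro acc i _
    exact hA acc i (d.getD i [])
  rw [hfold]
  have hkeys : d.keys = d.items.map Prod.fst := by
    simp [PySem.Dict.keys]
  have hmk : d = PySem.Dict.mk d.items := by
    cases d; rfl
  rw [hkeys]
  have hAfin := keys_fold_eq_items_fold d.items
    (by rw [← hkeys, hd]; exact PySem.Dict.nodup_keys_ofList mat)
    (fun s k row => row.foldl (fun s cv => s + cv.2 * (par.count (k, cv.1) : Int)) s) 0
  rw [← hmk] at hAfin
  rw [hAfin]
  -- B side: fold of lookups = sum of lookups, then items_build
  have hBsum : ∀ (val : PySem.Dict (Int × Int) Int),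
      par.foldl (fun suma p => suma + val.getD p 0) 0
        = (par.map (fun p => val.getD p 0)).sum := by
    intro val
    rw [PySem.List.foldl_add]
    simp
  rw [hBsum, items_build]
  have hempty : (par.map (fun p => (PySem.Dict.empty : PySem.Dict (Int × Int) Int).getD p 0)).sum = 0 := by
    simp [PySem.Dict.getD_empty]
  rw [hempty]
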